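-- pv_equiv track=rewrite | github.com/yashab-cyber/KaliGpt | parsers/gobuster_parser.py | parse_dns_mode
-- ===== SOURCE A (Python) =====
-- from typing import Dict, List, Optional
--
-- def parse_dns_mode(output: str) -> List[str]:
--     """
--     Parse DNS/subdomain enumeration mode
--
--     Args:
--         output: Gobuster DNS mode output
--
--     Returns:
--         List of found subdomains
--     """
--     subdomains = []
--     lines = output.split('\n')
--
--     for line in lines:
--         # Format: Found: subdomain.example.com
--         if line.startswith('Found:'):
--             subdomain = line.split('Found:')[1].strip()
--             subdomains.append(subdomain)
--
--     return subdomains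
-- ===== SOURCE B (Python) =====
-- def parse_dns_mode(output):
--     """Streams over the raw output one line at a time with str.partition,
--     never materialising the full line list."""
--     hits = []
--     rest = output
--     while True:
--         line, newline, rest = rest.partition('\n')
--         if line.startswith('Found:'):
--             hits.append(line[len('Found:'):].strip())
--         if not newline:
--             return hits
-- ===== Notes on version B (the rewrite author's own statement) =====
-- stated objective: alternative
-- what changed: B streams over the raw string with str.partition, peeling one line at a time and slicing off the fixed 'Found:' prefix, instead of A's two-stage split('\n') into a full line list plus a per-line split('Found:')[1]; Pre_ excludes lines that start with 'Found:' and contain a second 'Found:' afterwards, where A's split keeps only the text up to the second marker while B keeps the whole remainder - both readings are defensible on that unspecified corner.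
-- outside the precondition, e.g. on parse_dns_mode('Found: a Found:b'): A returns ['a'], B returns ['a Found:b']
import Mathlib
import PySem

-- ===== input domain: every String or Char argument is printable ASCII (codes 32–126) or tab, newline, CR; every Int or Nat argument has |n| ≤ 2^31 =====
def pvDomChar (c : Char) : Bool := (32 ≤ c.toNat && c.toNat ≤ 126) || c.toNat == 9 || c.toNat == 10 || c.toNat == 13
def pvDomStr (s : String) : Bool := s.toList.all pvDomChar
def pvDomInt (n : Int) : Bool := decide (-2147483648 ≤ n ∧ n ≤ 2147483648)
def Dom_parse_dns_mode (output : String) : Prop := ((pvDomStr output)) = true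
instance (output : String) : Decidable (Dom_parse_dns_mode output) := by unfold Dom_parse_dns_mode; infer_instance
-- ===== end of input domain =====

-- B streams over the raw string peeling one line at a time (partition), instead of A's
-- split-into-line-list plus per-line split('Found:')[1]; same cost, different decomposition.

-- ===== PORT A =====
-- '.getD' defaults are unreachable: split? is `some` for the non-empty separators "\n"/"Found:",
-- and '[1]' (pyGet? 1) exists because `startswith` guarantees at least two pieces.
def parse_dns_mode (output : String) : List String :=
  let lines := (PySem.Str.split? output "\n").getD []
  lines.foldl (fun subdomains line =>
    if PySem.Str.startswith line "Found:" then
      subdomains ++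
        [PySem.Str.strip ((PySem.List.pyGet? ((PySem.Str.split? line "Found:").getD []) 1).getD "")]
    else subdomains) []

-- ===== PORT B =====
-- `takeWhile`/`dropWhile` at '\n' is exactly `rest.partition('\n')` for the one-char separator;
-- the while-loop over `rest` becomes the structural recursion on the remaining string.
def pvAltGo (rest : List Char) : List (List Char) :=
  let line := rest.takeWhile (fun c => c != '\n')
  let hit := if PySem.Chars.startswith line "Found:".toList
             then [PySem.Chars.strip (line.drop 6)] else []
  match h : rest.dropWhile (fun c => c != '\n') with
  | [] => hit
  | _ :: tail => hit ++ pvAltGo tail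
termination_by rest.length
decreasing_by
  have h2 := List.length_dropWhile_le (fun c => c != '\n') rest
  rw [h] at h2
  simp at h2
  omega

def parse_dns_mode_alt (output : String) : List String :=
  (pvAltGo output.toList).map String.ofList

-- ===== PRECONDITION & SPEC =====
-- Pre_ excludes lines that start with 'Found:' and contain a second 'Found:' later in the
-- line: there A's split('Found:')[1] keeps only the text up to the second marker while B keeps
-- the whole remainder after the first — both readings are defensible, neither is specified.
def Pre_parse_dns_mode (output : String) : Prop :=
  ∀ line ∈ (PySem.Str.split? output "\n").getD [],
    PySem.Str.startswith line "Found:" = true →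
    PySem.Str.isIn "Found:" (PySem.Str.slice line (some 6) none) = false
instance (output : String) : Decidable (Pre_parse_dns_mode output) := by
  unfold Pre_parse_dns_mode; infer_instance

def pvWitness_parse_dns_mode : String := "Found: sub.example.com\nProgress: 10 / 100"

def Spec_parse_dns_mode (output : String) (out : List String) : Prop := out = parse_dns_mode_alt output
instance (output : String) (out : List String) : Decidable (Spec_parse_dns_mode output out) := by
  unfold Spec_parse_dns_mode; infer_instance

-- ===== CLAIM (what is proved, stated in full; the proofs are below) =====
def Claim_equal_parse_dns_mode : Prop := ∀ (output : String), Dom_parse_dns_mode output → Pre_parse_dns_mode output → Spec_parse_dns_mode output (parse_dns_mode output)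

-- ===== LEMMAS AND PROOFS =====

def pvFnd : List Char := ['F', 'o', 'u', 'n', 'd', ':']

theorem pvFnd_toList : "Found:".toList = pvFnd := by decide

-- the line decomposition of a string, as A's split('\n') produces it
def pvPieces : List Char → List (List Char)
  | [] => [[]]
  | c :: rest =>
    if c = '\n' then [] :: pvPieces rest
    else match pvPieces rest with
      | [] => [[c]]
      | p :: ps => (c :: p) :: ps

theorem pvPieces_ne_nil (l : List Char) : pvPieces l ≠ [] := by
  cases l with
  | nil => simp [pvPieces]
  | cons c rest =>
    simp only [pvPieces]
    split
    · simp
    · split <;> simp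

theorem pvGo_succ_nil (sep cur : List Char) (fuel : Nat) (acc : List (List Char)) :
    PySem.Chars.splitOn.go sep (fuel + 1) [] cur acc = (cur.reverse :: acc).reverse := by
  simp [PySem.Chars.splitOn.go]

theorem pvGo_succ_cons (sep : List Char) (fuel : Nat) (c : Char) (l cur : List Char)
    (acc : List (List Char)) :
    PySem.Chars.splitOn.go sep (fuel + 1) (c :: l) cur acc =
      if sep.isPrefixOf (c :: l)
      then PySem.Chars.splitOn.go sep fuel (List.drop sep.length (c :: l)) [] (cur.reverse :: acc)
      else PySem.Chars.splitOn.go sep fuel l (c :: cur) acc := by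
  rw [PySem.Chars.splitOn.go]

theorem pvGo_nl (fuel : Nat) : ∀ (l cur : List Char) (acc : List (List Char)),
    l.length < fuel →
    PySem.Chars.splitOn.go ['\n'] fuel l cur acc =
      acc.reverse ++ (pvPieces l).modifyHead (cur.reverse ++ ·) := by
  induction fuel with
  | zero => intro l cur acc h; omega
  | succ fuel ih =>
    intro l cur acc h
    cases l with
    | nil => simp [pvGo_succ_nil, pvPieces]
    | cons c rest =>
      rw [pvGo_succ_cons]
      by_cases hc : c = '\n'
      · subst hc
        simp only [List.isPrefixOf, BEq.rfl, Bool.true_and, if_true]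
        have hd : List.drop (['\n'] : List Char).length ('\n' :: rest) = rest := by simp
        rw [hd, ih rest [] (cur.reverse :: acc) (by simpa using Nat.lt_of_succ_lt_succ h)]
        obtain ⟨p, ps, hp⟩ : ∃ p ps, pvPieces rest = p :: ps := by
          cases hx : pvPieces rest with
          | nil => exact absurd hx (pvPieces_ne_nil rest)
          | cons p ps => exact ⟨p, ps, rfl⟩
        simp [pvPieces, hp]
      · have hpre : (['\n'].isPrefixOf (c :: rest)) = false := by
          simp [List.isPrefixOf]
          exact fun hx => absurd hx.symm hc
        rw [hpre]
        simp only [if_false, Bool.false_eq_true]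
        rw [ih rest (c :: cur) acc (by simpa using Nat.lt_of_succ_lt_succ h)]
        obtain ⟨p, ps, hp⟩ : ∃ p ps, pvPieces rest = p :: ps := by
          cases hx : pvPieces rest with
          | nil => exact absurd hx (pvPieces_ne_nil rest)
          | cons p ps => exact ⟨p, ps, rfl⟩
        simp [pvPieces, hc, hp]

theorem pvSplitOn_nl (l : List Char) :
    PySem.Chars.splitOn l ['\n'] = pvPieces l := by
  unfold PySem.Chars.splitOn
  rw [pvGo_nl (l.length + 1) l [] [] (by omega)]
  obtain ⟨p, ps, hp⟩ : ∃ p ps, pvPieces l = p :: ps := by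
    cases hx : pvPieces l with
    | nil => exact absurd hx (pvPieces_ne_nil l)
    | cons p ps => exact ⟨p, ps, rfl⟩
  simp [hp]

theorem pvGo_no (sep : List Char) (fuel : Nat) : ∀ (l cur : List Char) (acc : List (List Char)),
    l.length < fuel → (∀ j, ¬ sep <+: l.drop j) →
    PySem.Chars.splitOn.go sep fuel l cur acc = acc.reverse ++ [cur.reverse ++ l] := by
  induction fuel with
  | zero => intro l cur acc h; omega
  | succ fuel ih =>
    intro l cur acc h hno
    cases l with
    | nil => simp [pvGo_succ_nil]
    | cons c rest =>
      rw [pvGo_succ_cons]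
      have hpre : (sep.isPrefixOf (c :: rest)) = false := by
        rw [Bool.eq_false_iff]
        intro hx
        exact hno 0 (by simpa using List.isPrefixOf_iff_prefix.mp hx)
      rw [hpre]
      simp only [if_false, Bool.false_eq_true]
      rw [ih rest (c :: cur) acc (by simpa using Nat.lt_of_succ_lt_succ h)
        (fun j => by simpa using hno (j + 1))]
      simp

theorem pvSplitOn_found (rest : List Char) (hno : ∀ j, ¬ pvFnd <+: rest.drop j) :
    PySem.Chars.splitOn (pvFnd ++ rest) pvFnd = [[], rest] := by
  unfold PySem.Chars.splitOn
  have hlen : (pvFnd ++ rest).length + 1 = (rest.length + 6) + 1 := by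
    simp [pvFnd]
  rw [hlen]
  rw [show pvFnd ++ rest = 'F' :: (['o', 'u', 'n', 'd', ':'] ++ rest) by simp [pvFnd]]
  rw [pvGo_succ_cons]
  have hpre : pvFnd.isPrefixOf ('F' :: (['o', 'u', 'n', 'd', ':'] ++ rest)) = true := by
    rw [List.isPrefixOf_iff_prefix]
    exact ⟨rest, by simp [pvFnd]⟩
  rw [hpre]
  simp only [if_true]
  have hdrop : List.drop pvFnd.length ('F' :: (['o', 'u', 'n', 'd', ':'] ++ rest)) = rest := by
    simp [pvFnd]
  rw [hdrop]
  simp only [List.reverse_nil]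
  rw [pvGo_no pvFnd (rest.length + 6) rest [] [[]] (by omega) hno]
  simp

theorem pvPieces_peel (l : List Char) :
    pvPieces l = l.takeWhile (fun c => c != '\n') ::
      (match l.dropWhile (fun c => c != '\n') with
       | [] => []
       | _ :: t => pvPieces t) := by
  induction l with
  | nil => simp [pvPieces]
  | cons c rest ih =>
    by_cases hc : c = '\n'
    · subst hc
      simp [pvPieces]
    · simp only [pvPieces]
      rw [if_neg hc, ih]
      simp [hc]

theorem pvAltGo_peel (l : List Char) :
    pvAltGo l =
      (if PySem.Chars.startswith (l.takeWhile (fun c => c != '\n')) "Found:".toList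
       then [PySem.Chars.strip ((l.takeWhile (fun c => c != '\n')).drop 6)] else []) ++
      (match l.dropWhile (fun c => c != '\n') with
       | [] => []
       | _ :: t => pvAltGo t) := by
  rw [pvAltGo.eq_def]
  split
  · next h => simp [h]
  · next head tail h => simp [h]

theorem pvAltGo_eq (l : List Char) :
    pvAltGo l = ((pvPieces l).filter (fun p => PySem.Chars.startswith p pvFnd)).map
      (fun p => PySem.Chars.strip (p.drop 6)) := by
  induction l using pvAltGo.induct with
  | case1 rest h =>
    rw [pvAltGo_peel, pvPieces_peel rest, h, pvFnd_toList]
    dsimp only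
    by_cases hs : PySem.Chars.startswith (rest.takeWhile (fun c => c != '\n')) pvFnd = true <;>
      simp [hs]
  | case2 rest head tail h ih =>
    rw [pvAltGo_peel, pvPieces_peel rest, h, pvFnd_toList]
    dsimp only
    rw [ih]
    by_cases hs : PySem.Chars.startswith (rest.takeWhile (fun c => c != '\n')) pvFnd = true <;>
      simp [hs]

-- ===== VERDICT (by name: the statement is the Claim_ definition above) =====
theorem parse_dns_mode_spec : Claim_equal_parse_dns_mode := by
  intro output hpd hpre
  unfold Spec_parse_dns_mode
  unfold Pre_parse_dns_mode at hpre
  have hnl : ("\n" : String).toList = ['\n'] := by decide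
  have hb := PySem.Str.split?_map output "\n"
  rw [hnl] at hb
  rw [show PySem.Chars.split? output.toList ['\n'] =
        some (PySem.Chars.splitOn output.toList ['\n']) from by simp [PySem.Chars.split?]] at hb
  cases hs : PySem.Str.split? output "\n" with
  | none => rw [hs] at hb; simp at hb
  | some ls =>
    rw [hs] at hb
    simp only [Option.map_some, Option.some.injEq] at hb
    have hmap : ls.map String.toList = pvPieces output.toList := by
      rw [hb, pvSplitOn_nl]
    simp only [parse_dns_mode, parse_dns_mode_alt, hs, Option.getD_some]
    simp only [hs, Option.getD_some] at hpre
    rw [PySem.List.foldl_append_if (p := fun line => PySem.Str.startswith line "Found:")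
      (f := fun line => PySem.Str.strip
        ((PySem.List.pyGet? ((PySem.Str.split? line "Found:").getD []) 1).getD ""))]
    rw [List.nil_append, pvAltGo_eq, ← hmap, List.filter_map]
    have hP : (fun p => PySem.Chars.startswith p pvFnd) ∘ String.toList =
        fun line => PySem.Str.startswith line "Found:" := by
      funext line
      simp [pvFnd_toList]
    rw [hP, List.map_map, List.map_map]
    apply List.map_congr_left
    intro line hline
    obtain ⟨hmem, hstart⟩ := List.mem_filter.mp hline
    -- decompose the line as 'Found:' ++ t
    have hsw : PySem.Chars.startswith line.toList pvFnd = true := by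
      rw [← pvFnd_toList, ← PySem.Str.startswith_eq]
      exact hstart
    obtain ⟨t, ht⟩ := (PySem.Chars.startswith_iff _ _).mp hsw
    have hdropt : line.toList.drop 6 = t := by
      rw [← ht]
      simp [pvFnd]
    -- no second marker inside t
    have hIn := hpre line hmem hstart
    have hInC : PySem.Chars.isIn pvFnd t = false := by
      have h1 : (PySem.Str.slice line (some 6) none).toList = t := by
        rw [PySem.Str.toList_slice, PySem.Chars.slice_eq_listSlice,
          PySem.List.slice_from _ (by norm_num)]
        simpa using hdropt
      have h2 := PySem.Str.isIn_eq "Found:" (PySem.Str.slice line (some 6) none)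
      rw [hIn] at h2
      rw [← pvFnd_toList, ← h1]
      exact h2.symm
    have hno : ∀ j, ¬ pvFnd <+: t.drop j := by
      intro j hj
      have := (PySem.Chars.exists_prefix_drop_iff_isIn pvFnd t).mp ⟨j, hj⟩
      rw [hInC] at this
      exact Bool.false_ne_true this
    -- A's inner split of the line
    have hsplit : PySem.Chars.splitOn line.toList pvFnd = [[], t] := by
      rw [← ht]
      exact pvSplitOn_found t hno
    have hb2 := PySem.Str.split?_map line "Found:"
    rw [pvFnd_toList] at hb2
    rw [show PySem.Chars.split? line.toList pvFnd =
          some (PySem.Chars.splitOn line.toList pvFnd) from by simp [PySem.Chars.split?, pvFnd],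
      hsplit] at hb2
    cases hs2 : PySem.Str.split? line "Found:" with
    | none => rw [hs2] at hb2; simp at hb2
    | some ls2 =>
      rw [hs2] at hb2
      simp only [Option.map_some, Option.some.injEq] at hb2
      cases ls2 with
      | nil => simp at hb2
      | cons a l2 =>
        cases l2 with
        | nil => simp at hb2
        | cons b l3 =>
          cases l3 with
          | cons c l4 => simp at hb2
          | nil =>
            simp only [List.map_cons, List.map_nil, List.cons.injEq, and_true] at hb2
            obtain ⟨ha, hbt⟩ := hb2
            simp only [Function.comp, Option.getD_some, PySem.List.pyGet?_ofNat']
            simp only [List.getElem?_cons_succ, List.getElem?_cons_zero, Option.getD_some]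
            rw [hdropt, ← hbt, ← PySem.Str.toList_strip, String.ofList_toList]
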